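-- pv_equiv track=rewrite | github.com/guard1000/Everyday-coding | 190304_숫자 게임.py | solution
-- ===== SOURCE A (Python) =====
-- def solution(A, B):
--     answer = 0
--     A.sort(reverse=True)
--     B.sort(reverse=True)
--     while len(A) > 0 and len(B) > 0:
--         if A[0] < B[0]:
--             answer += 1
--             A.pop(0)
--             B.pop(0)
--         else:
--             A.pop(0)
--
--     return answer
-- ===== SOURCE B (Python) =====
-- def solution(A, B):
--     # Two pointers over sorted copies (does not mutate A/B; A sorts/empties its arguments in place).
--     a = sorted(A)
--     b = sorted(B)
--     ans = 0
--     i = len(a) - 1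
--     j = len(b) - 1
--     while i >= 0 and j >= 0:
--         if a[i] < b[j]:
--             ans += 1
--             i -= 1
--             j -= 1
--         else:
--             i -= 1
--     return ans
-- ===== Notes on version B (the rewrite author's own statement) =====
-- stated objective: faster
-- what changed: Replaces the destructive loop that repeatedly pops the front of the descending-sorted lists (each pop(0) is O(n)) with two index pointers walking down ascending-sorted copies, removing all shifting; also leaves the caller's lists unmutated.
import Mathlib
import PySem

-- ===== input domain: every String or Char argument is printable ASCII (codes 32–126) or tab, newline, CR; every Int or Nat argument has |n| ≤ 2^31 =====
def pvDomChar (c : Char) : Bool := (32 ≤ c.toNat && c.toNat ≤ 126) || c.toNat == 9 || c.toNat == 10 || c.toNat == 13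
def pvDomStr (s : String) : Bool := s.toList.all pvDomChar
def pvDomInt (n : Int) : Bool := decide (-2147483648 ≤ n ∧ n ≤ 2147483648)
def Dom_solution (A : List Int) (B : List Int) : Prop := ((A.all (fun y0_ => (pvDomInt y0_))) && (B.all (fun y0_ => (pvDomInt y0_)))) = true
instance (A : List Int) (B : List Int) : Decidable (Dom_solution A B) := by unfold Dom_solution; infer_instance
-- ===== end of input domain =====

-- B replaces the pop(0) loop over descending-sorted lists by two index pointers over ascending-sorted
-- copies (faster in a timing run; A sorts/empties its arguments in place, B does not mutate them —
-- the equivalence proved here is about the return value only).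

-- ===== PORT A =====
-- the while loop: heads of the two descending-sorted lists, pop(0) = drop the head
def solLoopA : List Int → List Int → Int
  | a :: as, b :: bs => if a < b then 1 + solLoopA as bs else solLoopA as (b :: bs)
  | _, _ => 0

def solution (A : List Int) (B : List Int) : Int :=
  solLoopA (PySem.List.sorted A (fun x => x) true) (PySem.List.sorted B (fun x => x) true)

-- ===== PORT B =====
-- the while loop of Source B: i,j are the pointers, encoded as i+1,j+1 : Nat (0 = pointer below 0)
def solLoopB (a b : List Int) : Nat → Nat → Int
  | 0, _ => 0
  | _ + 1, 0 => 0
  | i + 1, j + 1 =>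
    if a.getD i 0 < b.getD j 0 then 1 + solLoopB a b i j else solLoopB a b i (j + 1)

def solution_alt (A : List Int) (B : List Int) : Int :=
  let a := PySem.List.sorted A (fun x => x) false
  let b := PySem.List.sorted B (fun x => x) false
  solLoopB a b a.length b.length

-- ===== PRECONDITION & SPEC =====
def Spec_solution (A : List Int) (B : List Int) (out : Int) : Prop := out = solution_alt A B
instance (A : List Int) (B : List Int) (out : Int) : Decidable (Spec_solution A B out) := by unfold Spec_solution; infer_instance

-- ===== CLAIM (what is proved, stated in full; the proofs are below) =====
def Claim_equal_solution : Prop := ∀ (A : List Int) (B : List Int), Dom_solution A B → Spec_solution A B (solution A B)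

-- ===== LEMMAS AND PROOFS =====

-- the head element exposed when reversing a take, for an in-range index
theorem take_succ_reverse (a : List Int) (i : Nat) (h : i < a.length) :
    (a.take (i + 1)).reverse = a.getD i 0 :: (a.take i).reverse := by
  rw [List.take_add_one]
  simp [List.getD, List.getElem?_eq_getElem h]

theorem solLoopA_nil_right (l : List Int) : solLoopA l [] = 0 := by
  cases l <;> rfl

-- B's pointer loop computes A's pop loop on the reversed prefixes
theorem loopB_eq_loopA (a b : List Int) :
    ∀ i j, i ≤ a.length → j ≤ b.length →
      solLoopB a b i j = solLoopA ((a.take i).reverse) ((b.take j).reverse) := by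
  intro i
  induction i with
  | zero => intro j _ _; simp [solLoopB, solLoopA]
  | succ i ih =>
    intro j hi hj
    have hi' : i < a.length := hi
    cases j with
    | zero =>
      rw [take_succ_reverse a i hi']
      simp [solLoopB, solLoopA_nil_right]
    | succ j =>
      have hj' : j < b.length := hj
      rw [take_succ_reverse a i hi', take_succ_reverse b j hj']
      rw [solLoopB, solLoopA]
      by_cases h : a.getD i 0 < b.getD j 0
      · simp only [h, if_pos]
        rw [ih j (Nat.le_of_lt hi') (Nat.le_of_lt hj')]
      · simp only [h, if_neg, not_false_iff]
        rw [← take_succ_reverse b j hj']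
        exact ih (j + 1) (Nat.le_of_lt hi') hj

-- sorting descending = reverse of sorting ascending (Int values; equal elements are identical)
theorem sorted_rev_eq_reverse (xs : List Int) :
    PySem.List.sorted xs (fun x => x) true = (PySem.List.sorted xs (fun x => x) false).reverse := by
  have hp : (PySem.List.sorted xs (fun x => x) true).reverse.Perm
      (PySem.List.sorted xs (fun x => x) false) :=
    ((List.reverse_perm _).trans (PySem.List.sorted_perm xs (fun x => x) true)).trans
      (PySem.List.sorted_perm xs (fun x => x) false).symm
  have hs1 : (PySem.List.sorted xs (fun x => x) true).reverse.Pairwise (· ≤ ·) := by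
    rw [List.pairwise_reverse]
    exact PySem.List.sorted_pairwise_rev xs (fun x => x)
  have hs2 : (PySem.List.sorted xs (fun x => x) false).Pairwise (· ≤ ·) :=
    PySem.List.sorted_pairwise xs (fun x => x)
  have heq : (PySem.List.sorted xs (fun x => x) true).reverse
      = PySem.List.sorted xs (fun x => x) false :=
    hp.eq_of_pairwise (fun a b _ _ h1 h2 => le_antisymm h1 h2) hs1 hs2
  calc PySem.List.sorted xs (fun x => x) true
      = (PySem.List.sorted xs (fun x => x) true).reverse.reverse := (List.reverse_reverse _).symm
    _ = (PySem.List.sorted xs (fun x => x) false).reverse := by rw [heq]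

-- ===== VERDICT (by name: the statement is the Claim_ definition above) =====
theorem solution_spec : Claim_equal_solution := by
  intro A B _
  unfold Spec_solution solution solution_alt
  rw [loopB_eq_loopA _ _ _ _ (le_refl _) (le_refl _),
    List.take_length, List.take_length, ← sorted_rev_eq_reverse, ← sorted_rev_eq_reverse]
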